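-- pv_equiv track=rewrite | github.com/paulomoukarzel-sys/teste-IA | prazos/leitor_email.py | identificar_tribunal
-- ===== SOURCE A (Python) =====
-- TRIBUNAIS = {
--     # Superiores
--     "stj.jus.br":      "STJ",
--     "stf.jus.br":      "STF",
--     "tst.jus.br":      "TST",
--     "tse.jus.br":      "TSE",
--     "stm.jus.br":      "STM",
--     "cjf.jus.br":      "CJF",
--     "cnj.jus.br":      "CNJ",
--     # TRFs
--     "trf1.jus.br":     "TRF1",
--     "trf2.jus.br":     "TRF2",
--     "trf3.jus.br":     "TRF3",
--     "trf4.jus.br":     "TRF4",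
--     "trf5.jus.br":     "TRF5",
--     "trf6.jus.br":     "TRF6",
--     # Justiça Federal por estado
--     "jfsc.jus.br":     "JFSC",
--     "jfpr.jus.br":     "JFPR",
--     "jfrs.jus.br":     "JFRS",
--     "jfsp.jus.br":     "JFSP",
--     # TJs
--     "tjsc.jus.br":     "TJSC",
--     "tjsp.jus.br":     "TJSP",
--     "tjrs.jus.br":     "TJRS",
--     "tjpr.jus.br":     "TJPR",
--     "tjmg.jus.br":     "TJMG",
--     "tjrj.jus.br":     "TJRJ",
--     "tjba.jus.br":     "TJBA",
--     "tjgo.jus.br":     "TJGO",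
--     "tjms.jus.br":     "TJMS",
--     "tjmt.jus.br":     "TJMT",
--     "tjpa.jus.br":     "TJPA",
--     "tjpe.jus.br":     "TJPE",
--     "tjce.jus.br":     "TJCE",
--     "tjma.jus.br":     "TJMA",
--     "tjpi.jus.br":     "TJPI",
--     "tjal.jus.br":     "TJAL",
--     "tjse.jus.br":     "TJSE",
--     "tjrn.jus.br":     "TJRN",
--     "tjpb.jus.br":     "TJPB",
--     "tjam.jus.br":     "TJAM",
--     "tjpa.jus.br":     "TJPA",
--     "tjro.jus.br":     "TJRO",
--     "tjrr.jus.br":     "TJRR",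
--     "tjap.jus.br":     "TJAP",
--     "tjto.jus.br":     "TJTO",
--     "tjac.jus.br":     "TJAC",
--     "tjdf.jus.br":     "TJDF",
--     "tjdft.jus.br":    "TJDFT",
--     "tjrr.jus.br":     "TJRR",
--     # TRTs
--     "trt1.jus.br":     "TRT1",
--     "trt2.jus.br":     "TRT2",
--     "trt3.jus.br":     "TRT3",
--     "trt4.jus.br":     "TRT4",
--     "trt5.jus.br":     "TRT5",
--     "trt6.jus.br":     "TRT6",
--     "trt7.jus.br":     "TRT7",
--     "trt8.jus.br":     "TRT8",
--     "trt9.jus.br":     "TRT9",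
--     "trt10.jus.br":    "TRT10",
--     "trt11.jus.br":    "TRT11",
--     "trt12.jus.br":    "TRT12",
--     "trt13.jus.br":    "TRT13",
--     "trt14.jus.br":    "TRT14",
--     "trt15.jus.br":    "TRT15",
--     "trt16.jus.br":    "TRT16",
--     "trt17.jus.br":    "TRT17",
--     "trt18.jus.br":    "TRT18",
--     "trt19.jus.br":    "TRT19",
--     "trt20.jus.br":    "TRT20",
--     "trt21.jus.br":    "TRT21",
--     "trt22.jus.br":    "TRT22",
--     "trt23.jus.br":    "TRT23",
--     "trt24.jus.br":    "TRT24",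
--     # Portais eletrônicos
--     "eproc.jus.br":    "e-Proc",
--     "pje.jus.br":      "PJe",
--     "projudi.jus.br":  "PROJUDI",
--     # Genérico (qualquer .jus.br não mapeado)
--     "jus.br":          "Tribunal",
-- }
--
-- def identificar_tribunal(remetente, assunto, corpo):
--     """Retorna nome do tribunal ou None se não for e-mail de tribunal."""
--     texto = f"{remetente} {assunto} {corpo}".lower()
--     # Verifica remetente primeiro (mais confiável)
--     for dominio, nome in sorted(TRIBUNAIS.items(), key=lambda x: -len(x[0])):
--         if dominio in texto:
--             return nome
--     # Fallback: keywords no assunto/corpo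
--     keywords = ["tribunal", "juízo", "vara ", "câmara", "turma", "plenário",
--                 "intimação", "citação", "processo n.", "autos do processo",
--                 "e-proc", "pje", "projudi", "despacho", "decisão judicial"]
--     for kw in keywords:
--         if kw in texto:
--             return "Tribunal"
--     return None
-- ===== SOURCE B (Python) =====
-- # B stores only the court prefixes and derives each domain as pref + ".jus.br" and each
-- # name as pref.upper() (with a tiny exception map); one unsorted pass keeps the longest
-- # match seen so far (strictly-greater update = first of equal-length ties), then the
-- # generic "jus.br" check, then the keyword fallback.
-- PREFIXOS = [
--     "stj", "stf", "tst", "tse", "stm", "cjf", "cnj",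
--     "trf1", "trf2", "trf3", "trf4", "trf5", "trf6",
--     "jfsc", "jfpr", "jfrs", "jfsp",
--     "tjsc", "tjsp", "tjrs", "tjpr", "tjmg", "tjrj", "tjba", "tjgo", "tjms",
--     "tjmt", "tjpa", "tjpe", "tjce", "tjma", "tjpi", "tjal", "tjse", "tjrn",
--     "tjpb", "tjam", "tjro", "tjrr", "tjap", "tjto", "tjac", "tjdf", "tjdft",
--     "trt1", "trt2", "trt3", "trt4", "trt5", "trt6", "trt7", "trt8", "trt9",
--     "trt10", "trt11", "trt12", "trt13", "trt14", "trt15", "trt16", "trt17",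
--     "trt18", "trt19", "trt20", "trt21", "trt22", "trt23", "trt24",
--     "eproc", "pje", "projudi",
-- ]
--
-- ESPECIAIS = {"eproc": "e-Proc", "pje": "PJe", "projudi": "PROJUDI"}
--
-- KEYWORDS = ["tribunal", "juízo", "vara ", "câmara", "turma", "plenário",
--             "intimação", "citação", "processo n.", "autos do processo",
--             "e-proc", "pje", "projudi", "despacho", "decisão judicial"]
--
--
-- def identificar_tribunal(remetente, assunto, corpo):
--     """Retorna nome do tribunal ou None se não for e-mail de tribunal."""
--     texto = " ".join((remetente, assunto, corpo)).lower()
--     best_name, best_len = None, -1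
--     for pref in PREFIXOS:
--         dominio = pref + ".jus.br"
--         if best_len < len(dominio) and dominio in texto:
--             best_name = ESPECIAIS.get(pref, pref.upper())
--             best_len = len(dominio)
--     if best_name is not None:
--         return best_name
--     if "jus.br" in texto:
--         return "Tribunal"
--     return "Tribunal" if any(kw in texto for kw in KEYWORDS) else None
-- ===== Notes on version B (the rewrite author's own statement) =====
-- stated objective: alternative
-- what changed: B replaces A's per-call sort of a literal domain:name dict and first-match scan by a different data representation and traversal: a list of court prefixes from which each domain (pref + '.jus.br') and name (pref.upper(), small exception map) is derived, scanned once keeping a running longest match (strictly-greater update keeps first of ties), then an explicit generic 'jus.br' check, then the keyword fallback as an any().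
import Mathlib
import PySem

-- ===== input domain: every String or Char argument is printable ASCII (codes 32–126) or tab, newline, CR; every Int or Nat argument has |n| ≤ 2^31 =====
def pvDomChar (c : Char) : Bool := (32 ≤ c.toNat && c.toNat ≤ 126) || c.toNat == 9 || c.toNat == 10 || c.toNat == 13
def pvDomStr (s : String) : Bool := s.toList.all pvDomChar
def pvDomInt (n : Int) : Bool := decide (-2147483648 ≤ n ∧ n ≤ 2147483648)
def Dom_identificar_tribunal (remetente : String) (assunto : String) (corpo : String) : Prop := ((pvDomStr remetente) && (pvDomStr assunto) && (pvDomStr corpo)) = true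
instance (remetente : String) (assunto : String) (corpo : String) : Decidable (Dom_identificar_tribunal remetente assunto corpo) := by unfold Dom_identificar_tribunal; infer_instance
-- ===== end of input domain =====

-- B derives each domain from a prefix list (pref + ".jus.br", name = pref.upper() with a
-- small exception dict) and keeps a running longest match in one unsorted pass instead of
-- A's per-call sort + first-match scan; return-value equivalence, no argument is mutated.

def pvKEYWORDS : List String := ["tribunal", "juízo", "vara ", "câmara", "turma", "plenário", "intimação", "citação", "processo n.", "autos do processo", "e-proc", "pje", "projudi", "despacho", "decisão judicial"]

-- ===== PORT A =====
def pvTRIBUNAIS : List (String × String) := [("stj.jus.br", "STJ"),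
  ("stf.jus.br", "STF"),
  ("tst.jus.br", "TST"),
  ("tse.jus.br", "TSE"),
  ("stm.jus.br", "STM"),
  ("cjf.jus.br", "CJF"),
  ("cnj.jus.br", "CNJ"),
  ("trf1.jus.br", "TRF1"),
  ("trf2.jus.br", "TRF2"),
  ("trf3.jus.br", "TRF3"),
  ("trf4.jus.br", "TRF4"),
  ("trf5.jus.br", "TRF5"),
  ("trf6.jus.br", "TRF6"),
  ("jfsc.jus.br", "JFSC"),
  ("jfpr.jus.br", "JFPR"),
  ("jfrs.jus.br", "JFRS"),
  ("jfsp.jus.br", "JFSP"),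
  ("tjsc.jus.br", "TJSC"),
  ("tjsp.jus.br", "TJSP"),
  ("tjrs.jus.br", "TJRS"),
  ("tjpr.jus.br", "TJPR"),
  ("tjmg.jus.br", "TJMG"),
  ("tjrj.jus.br", "TJRJ"),
  ("tjba.jus.br", "TJBA"),
  ("tjgo.jus.br", "TJGO"),
  ("tjms.jus.br", "TJMS"),
  ("tjmt.jus.br", "TJMT"),
  ("tjpa.jus.br", "TJPA"),
  ("tjpe.jus.br", "TJPE"),
  ("tjce.jus.br", "TJCE"),
  ("tjma.jus.br", "TJMA"),
  ("tjpi.jus.br", "TJPI"),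
  ("tjal.jus.br", "TJAL"),
  ("tjse.jus.br", "TJSE"),
  ("tjrn.jus.br", "TJRN"),
  ("tjpb.jus.br", "TJPB"),
  ("tjam.jus.br", "TJAM"),
  ("tjro.jus.br", "TJRO"),
  ("tjrr.jus.br", "TJRR"),
  ("tjap.jus.br", "TJAP"),
  ("tjto.jus.br", "TJTO"),
  ("tjac.jus.br", "TJAC"),
  ("tjdf.jus.br", "TJDF"),
  ("tjdft.jus.br", "TJDFT"),
  ("trt1.jus.br", "TRT1"),
  ("trt2.jus.br", "TRT2"),
  ("trt3.jus.br", "TRT3"),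
  ("trt4.jus.br", "TRT4"),
  ("trt5.jus.br", "TRT5"),
  ("trt6.jus.br", "TRT6"),
  ("trt7.jus.br", "TRT7"),
  ("trt8.jus.br", "TRT8"),
  ("trt9.jus.br", "TRT9"),
  ("trt10.jus.br", "TRT10"),
  ("trt11.jus.br", "TRT11"),
  ("trt12.jus.br", "TRT12"),
  ("trt13.jus.br", "TRT13"),
  ("trt14.jus.br", "TRT14"),
  ("trt15.jus.br", "TRT15"),
  ("trt16.jus.br", "TRT16"),
  ("trt17.jus.br", "TRT17"),
  ("trt18.jus.br", "TRT18"),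
  ("trt19.jus.br", "TRT19"),
  ("trt20.jus.br", "TRT20"),
  ("trt21.jus.br", "TRT21"),
  ("trt22.jus.br", "TRT22"),
  ("trt23.jus.br", "TRT23"),
  ("trt24.jus.br", "TRT24"),
  ("eproc.jus.br", "e-Proc"),
  ("pje.jus.br", "PJe"),
  ("projudi.jus.br", "PROJUDI"),
  ("jus.br", "Tribunal")]

def pvFindDomA : List (String × String) → List Char → Option String
  | [], _ => none
  | (dominio, nome) :: rest, texto =>
      if PySem.Chars.isIn dominio.toList texto then some nome else pvFindDomA rest texto

def pvFindKwA : List String → List Char → Option String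
  | [], _ => none
  | kw :: rest, texto =>
      if PySem.Chars.isIn kw.toList texto then some "Tribunal" else pvFindKwA rest texto

def identificar_tribunal (remetente : String) (assunto : String) (corpo : String) : Option String :=
  let texto := PySem.Chars.lower (remetente.toList ++ ' ' :: (assunto.toList ++ ' ' :: corpo.toList))
  match pvFindDomA (PySem.List.sorted pvTRIBUNAIS (fun x => -(PySem.Str.len x.1))) texto with
  | some nome => some nome
  | none => pvFindKwA pvKEYWORDS texto

-- ===== PORT B =====
def pvPREFIXOS : List String := ["stj", "stf", "tst", "tse", "stm", "cjf", "cnj", "trf1", "trf2", "trf3", "trf4", "trf5", "trf6", "jfsc", "jfpr", "jfrs", "jfsp", "tjsc", "tjsp", "tjrs", "tjpr", "tjmg", "tjrj", "tjba", "tjgo", "tjms", "tjmt", "tjpa", "tjpe", "tjce", "tjma", "tjpi", "tjal", "tjse", "tjrn", "tjpb", "tjam", "tjro", "tjrr", "tjap", "tjto", "tjac", "tjdf", "tjdft", "trt1", "trt2", "trt3", "trt4", "trt5", "trt6", "trt7", "trt8", "trt9", "trt10", "trt11", "trt12", "trt13", "trt14", "trt15", "trt16", "trt17", "trt18", "trt19",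 "trt20", "trt21", "trt22", "trt23", "trt24", "eproc", "pje", "projudi"]

def pvESPECIAIS : PySem.Dict String String :=
  PySem.Dict.ofList [("eproc", "e-Proc"), ("pje", "PJe"), ("projudi", "PROJUDI")]

def identificar_tribunal_alt (remetente : String) (assunto : String) (corpo : String) : Option String :=
  let texto := PySem.Chars.lower (remetente.toList ++ ' ' :: (assunto.toList ++ ' ' :: corpo.toList))
  let best := pvPREFIXOS.foldl
    (fun b pref =>
      let dominio := pref.toList ++ ".jus.br".toList
      if b.2 < (dominio.length : Int) ∧ PySem.Chars.isIn dominio texto then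
        (some (PySem.Dict.getD pvESPECIAIS pref (String.ofList (PySem.Chars.upper pref.toList))), (dominio.length : Int))
      else b)
    ((none : Option String), (-1 : Int))
  match best.1 with
  | some nome => some nome
  | none =>
      if PySem.Chars.isIn "jus.br".toList texto then some "Tribunal"
      else if pvKEYWORDS.any (fun kw => PySem.Chars.isIn kw.toList texto) then some "Tribunal"
      else none

-- ===== PRECONDITION & SPEC =====
def Spec_identificar_tribunal (remetente : String) (assunto : String) (corpo : String) (out : Option String) : Prop := out = identificar_tribunal_alt remetente assunto corpo
instance (remetente : String) (assunto : String) (corpo : String) (out : Option String) : Decidable (Spec_identificar_tribunal remetente assunto corpo out) := by unfold Spec_identificar_tribunal; infer_instance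

-- ===== CLAIM (what is proved, stated in full; the proofs are below) =====
def Claim_equal_identificar_tribunal : Prop := ∀ (remetente : String) (assunto : String) (corpo : String), Dom_identificar_tribunal remetente assunto corpo → Spec_identificar_tribunal remetente assunto corpo (identificar_tribunal remetente assunto corpo)

-- ===== LEMMAS AND PROOFS =====

-- the first 71 entries of the sorted table A builds each call (the 72nd, shortest, is ("jus.br", "Tribunal"))
def pvSORT71 : List (String × String) := [("projudi.jus.br", "PROJUDI"),
  ("tjdft.jus.br", "TJDFT"),
  ("trt10.jus.br", "TRT10"),
  ("trt11.jus.br", "TRT11"),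
  ("trt12.jus.br", "TRT12"),
  ("trt13.jus.br", "TRT13"),
  ("trt14.jus.br", "TRT14"),
  ("trt15.jus.br", "TRT15"),
  ("trt16.jus.br", "TRT16"),
  ("trt17.jus.br", "TRT17"),
  ("trt18.jus.br", "TRT18"),
  ("trt19.jus.br", "TRT19"),
  ("trt20.jus.br", "TRT20"),
  ("trt21.jus.br", "TRT21"),
  ("trt22.jus.br", "TRT22"),
  ("trt23.jus.br", "TRT23"),
  ("trt24.jus.br", "TRT24"),
  ("eproc.jus.br", "e-Proc"),
  ("trf1.jus.br", "TRF1"),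
  ("trf2.jus.br", "TRF2"),
  ("trf3.jus.br", "TRF3"),
  ("trf4.jus.br", "TRF4"),
  ("trf5.jus.br", "TRF5"),
  ("trf6.jus.br", "TRF6"),
  ("jfsc.jus.br", "JFSC"),
  ("jfpr.jus.br", "JFPR"),
  ("jfrs.jus.br", "JFRS"),
  ("jfsp.jus.br", "JFSP"),
  ("tjsc.jus.br", "TJSC"),
  ("tjsp.jus.br", "TJSP"),
  ("tjrs.jus.br", "TJRS"),
  ("tjpr.jus.br", "TJPR"),
  ("tjmg.jus.br", "TJMG"),
  ("tjrj.jus.br", "TJRJ"),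
  ("tjba.jus.br", "TJBA"),
  ("tjgo.jus.br", "TJGO"),
  ("tjms.jus.br", "TJMS"),
  ("tjmt.jus.br", "TJMT"),
  ("tjpa.jus.br", "TJPA"),
  ("tjpe.jus.br", "TJPE"),
  ("tjce.jus.br", "TJCE"),
  ("tjma.jus.br", "TJMA"),
  ("tjpi.jus.br", "TJPI"),
  ("tjal.jus.br", "TJAL"),
  ("tjse.jus.br", "TJSE"),
  ("tjrn.jus.br", "TJRN"),
  ("tjpb.jus.br", "TJPB"),
  ("tjam.jus.br", "TJAM"),
  ("tjro.jus.br", "TJRO"),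
  ("tjrr.jus.br", "TJRR"),
  ("tjap.jus.br", "TJAP"),
  ("tjto.jus.br", "TJTO"),
  ("tjac.jus.br", "TJAC"),
  ("tjdf.jus.br", "TJDF"),
  ("trt1.jus.br", "TRT1"),
  ("trt2.jus.br", "TRT2"),
  ("trt3.jus.br", "TRT3"),
  ("trt4.jus.br", "TRT4"),
  ("trt5.jus.br", "TRT5"),
  ("trt6.jus.br", "TRT6"),
  ("trt7.jus.br", "TRT7"),
  ("trt8.jus.br", "TRT8"),
  ("trt9.jus.br", "TRT9"),
  ("stj.jus.br", "STJ"),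
  ("stf.jus.br", "STF"),
  ("tst.jus.br", "TST"),
  ("tse.jus.br", "TSE"),
  ("stm.jus.br", "STM"),
  ("cjf.jus.br", "CJF"),
  ("cnj.jus.br", "CNJ"),
  ("pje.jus.br", "PJe")]

-- B's table entry derived from a prefix, exactly as the B port computes it
def pvEntry (pref : String) : String × String :=
  (String.ofList (pref.toList ++ ".jus.br".toList),
   PySem.Dict.getD pvESPECIAIS pref (String.ofList (PySem.Chars.upper pref.toList)))

def pvPred (t : List Char) (p : String × String) : Bool := PySem.Chars.isIn p.1.toList t
def pvLen (p : String × String) : Nat := p.1.toList.length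

-- maximal length of a matching domain (0 if none matches)
def pvM (t : List Char) : List (String × String) → Nat
  | [] => 0
  | p :: rest => if pvPred t p then max (pvLen p) (pvM t rest) else pvM t rest

-- common reference value: first domain of maximal matching length
def pvSpec (t : List Char) (l : List (String × String)) : Option String :=
  (l.find? (fun p => pvPred t p && (pvLen p == pvM t l))).map Prod.snd

lemma pv_find?_congr_mem {α : Type} {l : List α} {f g : α → Bool}
    (h : ∀ x ∈ l, f x = g x) : l.find? f = l.find? g := by
  induction l with
  | nil => rfl
  | cons x xs ih =>
      simp only [List.find?]
      rw [h x (List.mem_cons_self)]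
      cases g x with
      | true => rfl
      | false => exact ih (fun y hy => h y (List.mem_cons_of_mem _ hy))

lemma pvM_le {t : List Char} {c : Nat} : ∀ {l : List (String × String)},
    (∀ p ∈ l, pvPred t p → pvLen p ≤ c) → pvM t l ≤ c := by
  intro l
  induction l with
  | nil => intro _; exact Nat.zero_le c
  | cons p rest ih =>
      intro h
      simp only [pvM]
      by_cases hp : pvPred t p
      · simp only [hp, if_true]
        exact max_le (h p List.mem_cons_self hp) (ih fun q hq => h q (List.mem_cons_of_mem _ hq))
      · simp only [hp]
        exact ih fun q hq => h q (List.mem_cons_of_mem _ hq)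

lemma pvM_ub {t : List Char} : ∀ {l : List (String × String)} {p : String × String},
    p ∈ l → pvPred t p → pvLen p ≤ pvM t l := by
  intro l
  induction l with
  | nil => intro p hp; cases hp
  | cons q rest ih =>
      intro p hp hpred
      simp only [pvM]
      rcases List.mem_cons.mp hp with rfl | hmem
      · simp [hpred]
      · by_cases hq : pvPred t q
        · simp only [hq, if_true]
          exact le_trans (ih hmem hpred) (le_max_right _ _)
        · simp only [hq]
          exact ih hmem hpred

lemma pvM_att {t : List Char} : ∀ {l : List (String × String)},
    pvM t l ≠ 0 → ∃ p ∈ l, pvPred t p = true ∧ pvLen p = pvM t l := by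
  intro l
  induction l with
  | nil => intro h; exact absurd rfl h
  | cons q rest ih =>
      intro h
      simp only [pvM] at h ⊢
      by_cases hq : pvPred t q
      · simp only [hq, if_true] at h ⊢
        by_cases hm : pvM t rest ≤ pvLen q
        · exact ⟨q, List.mem_cons_self, hq, (max_eq_left hm).symm⟩
        · obtain ⟨p, hp, hpd, hpl⟩ := ih (by omega)
          exact ⟨p, List.mem_cons_of_mem _ hp, hpd, by rw [hpl]; omega⟩
      · simp only [hq] at h ⊢
        obtain ⟨p, hp, hpd, hpl⟩ := ih h
        exact ⟨p, List.mem_cons_of_mem _ hp, hpd, hpl⟩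

-- A's scan of a length-sorted table returns the first domain of maximal matching length
lemma pv_findA_eq_spec (t : List Char) : ∀ (s : List (String × String)),
    s.Pairwise (fun p q => pvLen q ≤ pvLen p) → pvFindDomA s t = pvSpec t s := by
  intro s
  induction s with
  | nil => intro _; rfl
  | cons p rest ih =>
      intro hpair
      obtain ⟨hhead, htail⟩ := List.pairwise_cons.mp hpair
      by_cases hp : pvPred t p
      · have hm : pvM t (p :: rest) = pvLen p := by
          simp only [pvM, hp, if_true]
          exact max_eq_left (pvM_le fun q hq _ => hhead q hq)
        simp only [pvFindDomA, pvSpec, List.find?, hm]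
        have : pvPred t p = true := hp
        simp [pvPred] at this
        simp [this, pvPred]
      · have hm : pvM t (p :: rest) = pvM t rest := by simp [pvM, hp]
        have hp' : PySem.Chars.isIn p.1.toList t = false := by
          simpa [pvPred] using hp
        simp only [pvFindDomA, pvSpec, List.find?, hm, hp']
        have : (pvPred t p && (pvLen p == pvM t rest)) = false := by simp [pvPred, hp']
        simp only [this]
        exact ih htail

-- A's scan of a table with one appended entry
lemma pv_findA_append (t : List Char) (x : String × String) : ∀ (l : List (String × String)),
    pvFindDomA (l ++ [x]) t
      = (match pvFindDomA l t with
         | some nome => some nome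
         | none => if PySem.Chars.isIn x.1.toList t then some x.2 else none) := by
  intro l
  induction l with
  | nil => simp [pvFindDomA]
  | cons p rest ih =>
      simp only [List.cons_append, pvFindDomA]
      by_cases hp : PySem.Chars.isIn p.1.toList t
      · simp [hp]
      · simp only [hp, if_false, Bool.false_eq_true]
        exact ih

-- B's running-best fold, characterised against the same reference value
lemma pv_foldB_eq (t : List Char) : ∀ (l : List (String × String)) (acc : Option String × Int),
    l.foldl (fun b p => if b.2 < PySem.Str.len p.1 ∧ PySem.Chars.isIn p.1.toList t then (some p.2, PySem.Str.len p.1) else b) acc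
    = (match l.find? (fun p => pvPred t p && decide (acc.2 < (pvLen p : Int)) && (pvLen p == pvM t l)) with
       | some p => (some p.2, ((pvLen p : Nat) : Int))
       | none => acc) := by
  intro l
  induction l with
  | nil => intro acc; rfl
  | cons p rest ih =>
      intro acc
      have hlen : PySem.Str.len p.1 = ((pvLen p : Nat) : Int) := PySem.Str.len_eq p.1
      by_cases hp : PySem.Chars.isIn p.1.toList t
      · have hpb : pvPred t p = true := hp
        by_cases hb : acc.2 < ((pvLen p : Nat) : Int)
        · -- the entry matches and is longer than the running best: update
          rw [List.foldl_cons,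
            if_pos (show acc.2 < PySem.Str.len p.1 ∧ PySem.Chars.isIn p.1.toList t from
              ⟨by rw [hlen]; exact hb, hp⟩)]
          simp only [hlen]
          rw [ih]
          by_cases hM : pvM t rest ≤ pvLen p
          · -- p itself is the final best
            have hm : pvM t (p :: rest) = pvLen p := by
              simp only [pvM, hpb, if_true]; exact max_eq_left hM
            have hfr : rest.find? (fun q => pvPred t q && decide (((pvLen p : Nat) : Int) < (pvLen q : Int)) && (pvLen q == pvM t rest)) = none := by
              apply List.find?_eq_none.mpr
              intro q hq hcon
              simp only [Bool.and_eq_true, decide_eq_true_eq, beq_iff_eq] at hcon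
              omega
            have hfp : (pvPred t p && decide (acc.2 < ((pvLen p : Nat) : Int)) && (pvLen p == pvM t (p :: rest))) = true := by
              simp [hpb, hb, hm]
            simp only [List.find?, hfp, hfr]
          · -- a longer match exists further on
            have hm : pvM t (p :: rest) = pvM t rest := by
              simp only [pvM, hpb, if_true]; omega
            have hfp : (pvPred t p && decide (acc.2 < ((pvLen p : Nat) : Int)) && (pvLen p == pvM t rest)) = false := by
              have : (pvLen p == pvM t rest) = false := by simp; omega
              rw [this, Bool.and_false]
            have hcongr : rest.find? (fun q => pvPred t q && decide (((pvLen p : Nat) : Int) < (pvLen q : Int)) && (pvLen q == pvM t rest))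
                = rest.find? (fun q => pvPred t q && decide (acc.2 < (pvLen q : Int)) && (pvLen q == pvM t rest)) := by
              apply pv_find?_congr_mem
              intro q _
              by_cases he : pvLen q = pvM t rest
              · have h1 : (decide (((pvLen p : Nat) : Int) < (pvLen q : Int))) = true := by
                  simp only [decide_eq_true_eq]; omega
                have h2 : (decide (acc.2 < (pvLen q : Int))) = true := by
                  simp only [decide_eq_true_eq]; omega
                rw [h1, h2]
              · have he' : (pvLen q == pvM t rest) = false := by simp [he]
                rw [he', Bool.and_false, Bool.and_false]
            have hsome : ((rest.find? (fun q => pvPred t q && decide (acc.2 < (pvLen q : Int)) && (pvLen q == pvM t rest)))).isSome := by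
              rw [List.find?_isSome]
              obtain ⟨q, hq, hqd, hql⟩ := pvM_att (t := t) (l := rest) (by omega)
              refine ⟨q, hq, ?_⟩
              simp only [Bool.and_eq_true, decide_eq_true_eq, beq_iff_eq]
              exact ⟨⟨hqd, by omega⟩, hql⟩
            obtain ⟨q, hq⟩ := Option.isSome_iff_exists.mp hsome
            simp only [List.find?, hm, hfp, hcongr, hq]
        · -- the entry matches but is not longer than the running best: no update
          rw [List.foldl_cons,
            if_neg (show ¬ (acc.2 < PySem.Str.len p.1 ∧ PySem.Chars.isIn p.1.toList t) from
              fun h => hb (by rw [← hlen]; exact h.1))]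
          rw [ih]
          have hdec : (decide (acc.2 < ((pvLen p : Nat) : Int))) = false := by
            simp only [decide_eq_false_iff_not]; exact hb
          by_cases hM : pvM t rest ≤ pvLen p
          · have hm : pvM t (p :: rest) = pvLen p := by
              simp only [pvM, hpb, if_true]; exact max_eq_left hM
            have hn1 : rest.find? (fun q => pvPred t q && decide (acc.2 < (pvLen q : Int)) && (pvLen q == pvLen p)) = none := by
              apply List.find?_eq_none.mpr
              intro q hq hcon
              simp only [Bool.and_eq_true, decide_eq_true_eq, beq_iff_eq] at hcon
              omega
            have hn2 : rest.find? (fun q => pvPred t q && decide (acc.2 < (pvLen q : Int)) && (pvLen q == pvM t rest)) = none := by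
              apply List.find?_eq_none.mpr
              intro q hq hcon
              simp only [Bool.and_eq_true, decide_eq_true_eq, beq_iff_eq] at hcon
              omega
            simp only [List.find?, hm, hdec, Bool.and_false, Bool.false_and, hn1, hn2]
          · have hm : pvM t (p :: rest) = pvM t rest := by
              simp only [pvM, hpb, if_true]; omega
            simp only [List.find?, hm, hdec, Bool.and_false, Bool.false_and]
      · -- non-matching entry: skipped by both sides
        have hp' : PySem.Chars.isIn p.1.toList t = false := by
          simpa using hp
        have hm : pvM t (p :: rest) = pvM t rest := by simp [pvM, pvPred, hp']
        have hfp : (pvPred t p && decide (acc.2 < (pvLen p : Int)) && (pvLen p == pvM t rest)) = false := by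
          simp [pvPred, hp']
        rw [List.foldl_cons, if_neg (show ¬ (acc.2 < PySem.Str.len p.1 ∧ PySem.Chars.isIn p.1.toList t) from
          fun h => by rw [hp'] at h; exact Bool.false_ne_true h.2)]
        rw [ih]
        simp only [List.find?, hm, hfp]

-- pvSpec only depends on the table through its per-length slices (all lengths ≤ 20 here)
lemma pvSpec_congr (t : List Char) {s l : List (String × String)}
    (hf : ∀ k ≤ 20, s.filter (fun p => pvLen p == k) = l.filter (fun p => pvLen p == k))
    (hbs : ∀ p ∈ s, pvLen p ≤ 20) (hbl : ∀ p ∈ l, pvLen p ≤ 20) :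
    pvSpec t s = pvSpec t l := by
  have hmem : ∀ q, q ∈ s → q ∈ l := by
    intro q hq
    have hq' : q ∈ s.filter (fun p => pvLen p == pvLen q) := by
      simp [List.mem_filter, hq]
    rw [hf (pvLen q) (hbs q hq)] at hq'
    exact (List.mem_filter.mp hq').1
  have hmem' : ∀ q, q ∈ l → q ∈ s := by
    intro q hq
    have hq' : q ∈ l.filter (fun p => pvLen p == pvLen q) := by
      simp [List.mem_filter, hq]
    rw [← hf (pvLen q) (hbl q hq)] at hq'
    exact (List.mem_filter.mp hq').1
  have hM : pvM t s = pvM t l := by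
    apply le_antisymm
    · by_cases h0 : pvM t s = 0
      · omega
      · obtain ⟨q, hq, hqd, hql⟩ := pvM_att h0
        have := pvM_ub (hmem q hq) hqd
        omega
    · by_cases h0 : pvM t l = 0
      · omega
      · obtain ⟨q, hq, hqd, hql⟩ := pvM_att h0
        have := pvM_ub (hmem' q hq) hqd
        omega
  have hk : pvM t l ≤ 20 := pvM_le fun p hp _ => hbl p hp
  have key : ∀ (m : List (String × String)),
      m.find? (fun p => pvPred t p && (pvLen p == pvM t l))
      = (m.filter (fun p => pvLen p == pvM t l)).find? (pvPred t) := by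
    intro m
    rw [List.find?_filter]
    apply pv_find?_congr_mem
    intro x _
    by_cases hx : pvLen x = pvM t l
    · simp [hx]
    · simp [hx]
  unfold pvSpec
  rw [hM, key s, key l, hf (pvM t l) hk]

-- A's keyword loop is 'any'
lemma pv_findKw_eq (t : List Char) : ∀ (ks : List String),
    pvFindKwA ks t = (if ks.any (fun kw => PySem.Chars.isIn kw.toList t) then some "Tribunal" else none) := by
  intro ks
  induction ks with
  | nil => rfl
  | cons kw rest ih =>
      simp only [pvFindKwA, List.any_cons]
      by_cases h : PySem.Chars.isIn kw.toList t
      · simp [h]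
      · simp [h, ih]

set_option maxRecDepth 40000 in
lemma pv_sort_eq : PySem.List.sorted pvTRIBUNAIS (fun x => -(PySem.Str.len x.1)) = pvSORT71 ++ [("jus.br", "Tribunal")] := by decide

set_option maxRecDepth 40000 in
lemma pv_sort_pairwise : pvSORT71.Pairwise (fun p q => pvLen q ≤ pvLen p) := by decide

set_option maxRecDepth 40000 in
lemma pv_filters_eq : ∀ k ≤ 20, pvSORT71.filter (fun p => pvLen p == k) = (pvPREFIXOS.map pvEntry).filter (fun p => pvLen p == k) := by decide

set_option maxRecDepth 40000 in
lemma pv_bound_sort : ∀ p ∈ pvSORT71, pvLen p ≤ 20 := by decide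

set_option maxRecDepth 40000 in
lemma pv_bound_map : ∀ p ∈ pvPREFIXOS.map pvEntry, pvLen p ≤ 20 := by decide

-- the whole equivalence, for an arbitrary combined text
set_option maxRecDepth 40000 in
lemma pv_main (t : List Char) :
    (match pvFindDomA (PySem.List.sorted pvTRIBUNAIS (fun x => -(PySem.Str.len x.1))) t with
     | some nome => some nome
     | none => pvFindKwA pvKEYWORDS t)
    = (match (pvPREFIXOS.foldl
          (fun b pref =>
            let dominio := pref.toList ++ ".jus.br".toList
            if b.2 < (dominio.length : Int) ∧ PySem.Chars.isIn dominio t then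
              (some (PySem.Dict.getD pvESPECIAIS pref (String.ofList (PySem.Chars.upper pref.toList))), (dominio.length : Int))
            else b)
          ((none : Option String), (-1 : Int))).1 with
       | some nome => some nome
       | none =>
           if PySem.Chars.isIn "jus.br".toList t then some "Tribunal"
           else if pvKEYWORDS.any (fun kw => PySem.Chars.isIn kw.toList t) then some "Tribunal"
           else none) := by
  -- A's sorted-table scan, as the reference value plus the trailing generic entry
  have hA : pvFindDomA (PySem.List.sorted pvTRIBUNAIS (fun x => -(PySem.Str.len x.1))) t
      = (match pvSpec t (pvPREFIXOS.map pvEntry) with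
         | some nome => some nome
         | none => if PySem.Chars.isIn "jus.br".toList t then some "Tribunal" else none) := by
    rw [pv_sort_eq, pv_findA_append, pv_findA_eq_spec t pvSORT71 pv_sort_pairwise,
      pvSpec_congr t pv_filters_eq pv_bound_sort pv_bound_map]
  -- B's fold over the prefixes is the fold of pv_foldB_eq over the derived table
  have hbody : (fun (b : Option String × Int) (pref : String) =>
        let dominio := pref.toList ++ ".jus.br".toList
        if b.2 < (dominio.length : Int) ∧ PySem.Chars.isIn dominio t then
          (some (PySem.Dict.getD pvESPECIAIS pref (String.ofList (PySem.Chars.upper pref.toList))), (dominio.length : Int))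
        else b)
      = (fun (b : Option String × Int) (pref : String) =>
          (fun (b : Option String × Int) (p : String × String) =>
            if b.2 < PySem.Str.len p.1 ∧ PySem.Chars.isIn p.1.toList t then (some p.2, PySem.Str.len p.1) else b)
          b (pvEntry pref)) := by
    funext b pref
    simp [pvEntry, PySem.Str.len_eq]
  have hB : (pvPREFIXOS.foldl
        (fun b pref =>
          let dominio := pref.toList ++ ".jus.br".toList
          if b.2 < (dominio.length : Int) ∧ PySem.Chars.isIn dominio t then
            (some (PySem.Dict.getD pvESPECIAIS pref (String.ofList (PySem.Chars.upper pref.toList))), (dominio.length : Int))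
          else b)
        ((none : Option String), (-1 : Int))).1 = pvSpec t (pvPREFIXOS.map pvEntry) := by
    have hm := List.foldl_map (f := pvEntry)
      (g := fun (b : Option String × Int) (p : String × String) =>
        if b.2 < PySem.Str.len p.1 ∧ PySem.Chars.isIn p.1.toList t then (some p.2, PySem.Str.len p.1) else b)
      (l := pvPREFIXOS) (init := ((none : Option String), (-1 : Int)))
    rw [hbody, ← hm]
    rw [pv_foldB_eq t (pvPREFIXOS.map pvEntry) ((none : Option String), (-1 : Int))]
    have hcongr : (pvPREFIXOS.map pvEntry).find? (fun p => pvPred t p && decide (((none : Option String), (-1 : Int)).2 < (pvLen p : Int)) && (pvLen p == pvM t (pvPREFIXOS.map pvEntry)))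
        = (pvPREFIXOS.map pvEntry).find? (fun p => pvPred t p && (pvLen p == pvM t (pvPREFIXOS.map pvEntry))) := by
      apply pv_find?_congr_mem
      intro q _
      have hpos : decide (((none : Option String), (-1 : Int)).2 < (pvLen q : Int)) = true := by
        simp only [decide_eq_true_eq]
        omega
      rw [hpos, Bool.and_true]
    rw [hcongr]
    unfold pvSpec
    cases (pvPREFIXOS.map pvEntry).find? (fun p => pvPred t p && (pvLen p == pvM t (pvPREFIXOS.map pvEntry))) with
    | none => rfl
    | some p => rfl
  rw [hA, hB]
  cases pvSpec t (pvPREFIXOS.map pvEntry) with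
  | some nome => rfl
  | none =>
      by_cases hj : PySem.Chars.isIn "jus.br".toList t
      · simp only [hj, if_true]
      · simp only [hj, if_false, Bool.false_eq_true]
        exact pv_findKw_eq t pvKEYWORDS

-- ===== VERDICT (by name: the statement is the Claim_ definition above) =====
set_option maxRecDepth 40000 in
theorem identificar_tribunal_spec : Claim_equal_identificar_tribunal := by
  intro remetente assunto corpo _
  exact pv_main (PySem.Chars.lower (remetente.toList ++ ' ' :: (assunto.toList ++ ' ' :: corpo.toList)))
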